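-- pv_equiv track=rewrite | github.com/lrhyde/ai_nqueens | nqueens_part2.py | countC
-- ===== SOURCE A (Python) =====
-- def countC(state):
--     collisions= 0
--     past = []
--     for i in range(len(state)):
--         for j in range(i):
--             if(state[i]==state[j] and (j, i) not in past):
--                 collisions+=1
--                 past.append((i, j))
--             elif(abs(i-j)==abs(state[i]-state[j]) and (j, i) not in past):
--                 collisions+=1
--                 past.append((i, j))
--     return collisions
-- ===== SOURCE B (Python) =====
-- def countC(state):
--     # One pass: count previous queens sharing the row, the "/" diagonal (v - i)
--     # or the "\" diagonal (v + i); the three groups are disjoint for i != j,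
--     # so their counts sum to the number of colliding earlier queens.
--     rows = {}
--     diag1 = {}
--     diag2 = {}
--     total = 0
--     for i, v in enumerate(state):
--         total += rows.get(v, 0) + diag1.get(v - i, 0) + diag2.get(v + i, 0)
--         rows[v] = rows.get(v, 0) + 1
--         diag1[v - i] = diag1.get(v - i, 0) + 1
--         diag2[v + i] = diag2.get(v + i, 0) + 1
--     return total
-- ===== Notes on version B (the rewrite author's own statement) =====
-- stated objective: faster
-- what changed: Replaced the quadratic pair scan (with a dead 'past' list making it cubic) by a single pass that keeps hash-map counts of rows and of both diagonal keys and adds, for each queen, the number of earlier queens in the same group; the three groups are disjoint for distinct indices, so the sums agree pair-for-pair.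
import Mathlib
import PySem

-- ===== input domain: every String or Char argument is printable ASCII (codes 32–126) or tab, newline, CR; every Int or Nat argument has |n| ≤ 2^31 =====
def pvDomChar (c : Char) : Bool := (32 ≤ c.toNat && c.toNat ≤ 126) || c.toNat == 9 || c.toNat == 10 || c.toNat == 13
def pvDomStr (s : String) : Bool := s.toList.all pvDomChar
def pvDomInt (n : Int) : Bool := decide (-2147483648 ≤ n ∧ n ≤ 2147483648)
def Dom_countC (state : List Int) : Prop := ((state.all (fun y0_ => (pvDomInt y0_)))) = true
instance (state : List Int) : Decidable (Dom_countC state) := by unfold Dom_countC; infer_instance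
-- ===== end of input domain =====

-- B replaces A's O(n^3) pair scan by one O(n) pass over three count dictionaries
-- (row, v-i diagonal, v+i diagonal); return values proved equal on Dom.

-- ===== PORT A =====
-- inner-loop body of A (the j-loop step), kept as a named helper
def aStep (state : List Int) (i : Int) (acc2 : Int × List (Int × Int)) (j : Int) :
    Int × List (Int × Int) :=
  if PySem.List.pyGetD state i 0 = PySem.List.pyGetD state j 0 ∧ (j, i) ∉ acc2.2 then
    (acc2.1 + 1, acc2.2 ++ [(i, j)])
  else if |i - j| = |PySem.List.pyGetD state i 0 - PySem.List.pyGetD state j 0| ∧ (j, i) ∉ acc2.2 then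
    (acc2.1 + 1, acc2.2 ++ [(i, j)])
  else acc2

def countC (state : List Int) : Int :=
  ((PySem.List.pyRange 0 (PySem.List.len state)).foldl
    (fun acc i => (PySem.List.pyRange 0 i).foldl (aStep state i) acc)
    ((0 : Int), ([] : List (Int × Int)))).1

-- ===== PORT B =====
-- loop body of B: acc = (total, rows, diag1, diag2), p = (i, v)
def bStep (acc : Int × PySem.Dict Int Int × PySem.Dict Int Int × PySem.Dict Int Int)
    (p : Int × Int) : Int × PySem.Dict Int Int × PySem.Dict Int Int × PySem.Dict Int Int :=
  (acc.1 + acc.2.1.getD p.2 0 + acc.2.2.1.getD (p.2 - p.1) 0 + acc.2.2.2.getD (p.2 + p.1) 0,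
   acc.2.1.insert p.2 (acc.2.1.getD p.2 0 + 1),
   acc.2.2.1.insert (p.2 - p.1) (acc.2.2.1.getD (p.2 - p.1) 0 + 1),
   acc.2.2.2.insert (p.2 + p.1) (acc.2.2.2.getD (p.2 + p.1) 0 + 1))

def countC_alt (state : List Int) : Int :=
  ((PySem.List.enumerate state 0).foldl bStep
    (0, PySem.Dict.empty, PySem.Dict.empty, PySem.Dict.empty)).1

-- ===== PRECONDITION & SPEC =====
def Spec_countC (state : List Int) (out : Int) : Prop := out = countC_alt state
instance (state : List Int) (out : Int) : Decidable (Spec_countC state out) := by unfold Spec_countC; infer_instance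

-- ===== CLAIM (what is proved, stated in full; the proofs are below) =====
def Claim_equal_countC : Prop := ∀ (state : List Int), Dom_countC state → Spec_countC state (countC state)

-- ===== LEMMAS AND PROOFS =====

-- the collision predicate of A's inner loop (the 'past' test is vacuous: see aInner_spec)
abbrev predA (s : List Int) (i j : Int) : Prop :=
  PySem.List.pyGetD s i 0 = PySem.List.pyGetD s j 0 ∨
    |i - j| = |PySem.List.pyGetD s i 0 - PySem.List.pyGetD s j 0|

-- number of collisions queen i has with earlier queens
def NA (s : List Int) (i : Int) : Int :=
  ((PySem.List.pyRange 0 i).map (fun j => if predA s i j then (1 : Int) else 0)).sum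

-- total collision count, as a sum over the outer loop
def FA (s : List Int) : Int :=
  ((PySem.List.pyRange 0 (PySem.List.len s)).map (NA s)).sum

theorem aInner_spec (s : List Int) (i : Int) (l : List Int) (hl : ∀ j ∈ l, j < i) :
    ∀ (c : Int) (past : List (Int × Int)), (∀ p ∈ past, p.2 < p.1) →
      (l.foldl (aStep s i) (c, past)).1
        = c + (l.map (fun j => if predA s i j then (1 : Int) else 0)).sum
      ∧ ∀ p ∈ (l.foldl (aStep s i) (c, past)).2, p.2 < p.1 := by
  induction l with
  | nil => intro c past hp; simpa using hp
  | cons j l ih =>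
    intro c past hp
    have hj : j < i := hl j (by simp)
    have hl' : ∀ j' ∈ l, j' < i := fun j' h => hl j' (by simp [h])
    have hnm : (j, i) ∉ past := fun h => absurd (hp _ h) (by simp; omega)
    have hinv : ∀ p ∈ past ++ [(i, j)], p.2 < p.1 := by
      intro p hp'
      rcases List.mem_append.1 hp' with h | h
      · exact hp _ h
      · simp at h; simp [h]; omega
    by_cases h1 : PySem.List.pyGetD s i 0 = PySem.List.pyGetD s j 0
    · have hstep : aStep s i (c, past) j = (c + 1, past ++ [(i, j)]) := by
        simp [aStep, h1, hnm]
      have := ih hl' (c + 1) (past ++ [(i, j)]) hinv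
      rw [List.foldl_cons, hstep]
      refine ⟨?_, this.2⟩
      rw [this.1]; simp [predA, h1]; ring
    · by_cases h2 : |i - j| = |PySem.List.pyGetD s i 0 - PySem.List.pyGetD s j 0|
      · have hstep : aStep s i (c, past) j = (c + 1, past ++ [(i, j)]) := by
          simp [aStep, h1, h2, hnm]
        have := ih hl' (c + 1) (past ++ [(i, j)]) hinv
        rw [List.foldl_cons, hstep]
        refine ⟨?_, this.2⟩
        rw [this.1]; simp [predA, h2]; ring
      · have hstep : aStep s i (c, past) j = (c, past) := by
          simp [aStep, h1, h2]
        have := ih hl' c past hp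
        rw [List.foldl_cons, hstep]
        refine ⟨?_, this.2⟩
        rw [this.1]; simp [predA, h1, h2]

theorem aOuter_spec (s : List Int) (l : List Int) :
    ∀ (c : Int) (past : List (Int × Int)), (∀ p ∈ past, p.2 < p.1) →
      (l.foldl (fun acc i => (PySem.List.pyRange 0 i).foldl (aStep s i) acc) (c, past)).1
        = c + (l.map (NA s)).sum
      ∧ ∀ p ∈ (l.foldl (fun acc i => (PySem.List.pyRange 0 i).foldl (aStep s i) acc) (c, past)).2, p.2 < p.1 := by
  induction l with
  | nil => intro c past hp; simpa using hp
  | cons i l ih =>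
    intro c past hp
    have hmem : ∀ j ∈ PySem.List.pyRange 0 i, j < i := fun j h =>
      (PySem.List.mem_pyRange_one.1 h).2
    have hin := aInner_spec s i (PySem.List.pyRange 0 i) hmem c past hp
    set r := (PySem.List.pyRange 0 i).foldl (aStep s i) (c, past) with hr
    have hreq : r = (r.1, r.2) := rfl
    have := ih r.1 r.2 hin.2
    rw [List.foldl_cons, ← hr]
    rw [← hreq] at this
    refine ⟨?_, this.2⟩
    rw [this.1, hin.1]; unfold NA
    simp; ring

theorem countC_eq_FA (s : List Int) : countC s = FA s := by
  have := (aOuter_spec s (PySem.List.pyRange 0 (PySem.List.len s)) 0 [] (by simp)).1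
  unfold countC FA
  rw [this]; ring

theorem point_split (x n w j : Int) (hj : j < n) :
    (if (x = w ∨ |n - j| = |x - w|) then (1 : Int) else 0)
      = (if w = x then (1 : Int) else 0) + (if w - j = x - n then (1 : Int) else 0)
        + (if w + j = x + n then (1 : Int) else 0) := by
  rw [abs_of_pos (by omega : (0:Int) < n - j)]
  rcases abs_cases (x - w) with ⟨h, _⟩ | ⟨h, _⟩ <;> rw [h] <;> split_ifs <;> omega

theorem pyGetD_append_left (s t : List Int) (j : Int) (d : Int)
    (h0 : 0 ≤ j) (h1 : j < (s.length : Int)) :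
    PySem.List.pyGetD (s ++ t) j d = PySem.List.pyGetD s j d := by
  rw [PySem.List.pyGetD_eq_getElem (s ++ t) d h0 (by simp; omega),
      PySem.List.pyGetD_eq_getElem s d h0 (by omega)]
  rw [List.getElem_append_left (by omega)]

theorem pyGetD_append_self (s : List Int) (x : Int) (d : Int) :
    PySem.List.pyGetD (s ++ [x]) (s.length : Int) d = x := by
  rw [PySem.List.pyGetD_eq_getElem (s ++ [x]) d (by positivity) (by simp)]
  simp

theorem NA_frozen (s : List Int) (x : Int) (i : Int) (h0 : 0 ≤ i) (h1 : i < (s.length : Int)) :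
    NA (s ++ [x]) i = NA s i := by
  unfold NA
  refine congrArg List.sum (List.map_congr_left ?_)
  intro j hj
  obtain ⟨hj0, hji⟩ := PySem.List.mem_pyRange_one.1 hj
  simp only [predA, pyGetD_append_left s [x] i 0 h0 h1,
    pyGetD_append_left s [x] j 0 hj0 (by omega)]

theorem NA_last (s : List Int) (x : Int) :
    NA (s ++ [x]) (s.length : Int)
      = (s.map (fun w => if w = x then (1 : Int) else 0)).sum
        + ((PySem.List.enumerate s 0).map (fun p => if p.2 - p.1 = x - (s.length : Int) then (1 : Int) else 0)).sum
        + ((PySem.List.enumerate s 0).map (fun p => if p.2 + p.1 = x + (s.length : Int) then (1 : Int) else 0)).sum := by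
  unfold NA
  have hcong : ∀ j ∈ PySem.List.pyRange 0 (s.length : Int),
      (if predA (s ++ [x]) (s.length : Int) j then (1 : Int) else 0)
        = (if PySem.List.pyGetD s j 0 = x then (1 : Int) else 0)
          + (if PySem.List.pyGetD s j 0 - j = x - (s.length : Int) then (1 : Int) else 0)
          + (if PySem.List.pyGetD s j 0 + j = x + (s.length : Int) then (1 : Int) else 0) := by
    intro j hj
    obtain ⟨hj0, hjn⟩ := PySem.List.mem_pyRange_one.1 hj
    simp only [predA, pyGetD_append_self s x 0, pyGetD_append_left s [x] j 0 hj0 hjn]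
    exact point_split x (s.length : Int) (PySem.List.pyGetD s j 0) j hjn
  rw [List.map_congr_left hcong]
  rw [PySem.List.sum_map_add_int, PySem.List.sum_map_add_int]
  congr 2
  · rw [show (fun j => if PySem.List.pyGetD s j 0 = x then (1:Int) else 0)
        = (fun w => if w = x then (1:Int) else 0) ∘ (fun j => PySem.List.pyGetD s j 0) from rfl,
      ← List.map_map, PySem.List.map_pyGetD_pyRange_zero']
  · rw [PySem.List.enumerate_eq_map_pyRange s 0, List.map_map]
    simp [Function.comp_def, PySem.List.len]
  · rw [PySem.List.enumerate_eq_map_pyRange s 0, List.map_map]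
    simp [Function.comp_def, PySem.List.len]

theorem FA_append (s : List Int) (x : Int) :
    FA (s ++ [x]) = FA s + NA (s ++ [x]) (s.length : Int) := by
  unfold FA
  have hlen : PySem.List.len (s ++ [x]) = (s.length : Int) + 1 := by
    simp [PySem.List.len]
  rw [hlen, PySem.List.pyRange_one_succ_right (by positivity), List.map_append,
    List.sum_append]
  simp only [List.map_cons, List.map_nil, List.sum_cons, List.sum_nil, add_zero]
  have : PySem.List.len s = (s.length : Int) := by simp [PySem.List.len]
  rw [this]
  congr 2
  refine List.map_congr_left ?_
  intro i hi
  obtain ⟨h0, h1⟩ := PySem.List.mem_pyRange_one.1 hi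
  exact NA_frozen s x i h0 h1

theorem b_spec (s : List Int) :
    ((PySem.List.enumerate s 0).foldl bStep (0, PySem.Dict.empty, PySem.Dict.empty, PySem.Dict.empty)).1 = FA s
    ∧ (∀ v, ((PySem.List.enumerate s 0).foldl bStep (0, PySem.Dict.empty, PySem.Dict.empty, PySem.Dict.empty)).2.1.getD v 0
        = (s.map (fun w => if w = v then (1 : Int) else 0)).sum)
    ∧ (∀ k, ((PySem.List.enumerate s 0).foldl bStep (0, PySem.Dict.empty, PySem.Dict.empty, PySem.Dict.empty)).2.2.1.getD k 0
        = ((PySem.List.enumerate s 0).map (fun p => if p.2 - p.1 = k then (1 : Int) else 0)).sum)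
    ∧ (∀ k, ((PySem.List.enumerate s 0).foldl bStep (0, PySem.Dict.empty, PySem.Dict.empty, PySem.Dict.empty)).2.2.2.getD k 0
        = ((PySem.List.enumerate s 0).map (fun p => if p.2 + p.1 = k then (1 : Int) else 0)).sum) := by
  induction s using List.reverseRecOn with
  | nil => simp [PySem.List.enumerate, FA, PySem.List.len]
  | append_singleton s x ih =>
    obtain ⟨ih1, ih2, ih3, ih4⟩ := ih
    have henum : PySem.List.enumerate (s ++ [x]) 0
        = PySem.List.enumerate s 0 ++ [((s.length : Int), x)] := by
      rw [PySem.List.enumerate_append]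
      simp [PySem.List.enumerate]
    rw [henum, List.foldl_append]
    set r := (PySem.List.enumerate s 0).foldl bStep
      (0, PySem.Dict.empty, PySem.Dict.empty, PySem.Dict.empty) with hr
    refine ⟨?_, ?_, ?_, ?_⟩
    · show (bStep r ((s.length : Int), x)).1 = FA (s ++ [x])
      rw [FA_append, NA_last]
      simp only [bStep]
      rw [ih1, ih2 x, ih3 (x - (s.length : Int)), ih4 (x + (s.length : Int))]
      ring
    · intro v
      show (bStep r ((s.length : Int), x)).2.1.getD v 0 = _
      simp only [bStep, PySem.Dict.getD_insert]
      rw [List.map_append, List.sum_append]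
      simp only [List.map_cons, List.map_nil, List.sum_cons, List.sum_nil, add_zero]
      simp only [ih2]
      split_ifs with h h' h'
      · subst h; omega
      · omega
      · omega
      · omega
    · intro k
      show (bStep r ((s.length : Int), x)).2.2.1.getD k 0 = _
      simp only [bStep, PySem.Dict.getD_insert]
      rw [List.map_append, List.sum_append]
      simp only [List.map_cons, List.map_nil, List.sum_cons, List.sum_nil, add_zero]
      simp only [ih3]
      split_ifs with h h' h'
      · subst h; omega
      · omega
      · omega
      · omega
    · intro k
      show (bStep r ((s.length : Int), x)).2.2.2.getD k 0 = _
      simp only [bStep, PySem.Dict.getD_insert]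
      rw [List.map_append, List.sum_append]
      simp only [List.map_cons, List.map_nil, List.sum_cons, List.sum_nil, add_zero]
      simp only [ih4]
      split_ifs with h h' h'
      · subst h; omega
      · omega
      · omega
      · omega

-- ===== VERDICT (by name: the statement is the Claim_ definition above) =====
theorem countC_spec : Claim_equal_countC := by
  intro state _
  unfold Spec_countC countC_alt
  rw [countC_eq_FA, (b_spec state).1]
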